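-- pv_equiv track=rewrite | github.com/infomuscle/Algorithms_BOJ | CM2.py | solution
-- ===== SOURCE A (Python) =====
-- def solution(N, house):
--     answer = 0
--
--     factory = []
--     for i in range(-100, 101):
--             for j in range(-100, 101):
--                 factory.append([i, j])
--
--     distanceList = []
--     for h in range(0, len(house)):
--         distance = 0
--         for f in range(0, len(factory)):
--             temp = ((house[h][0]-factory[f][0])**2) + ((house[h][1]-factory[f][1])**2)
--             if temp >= distance:
--                 distance = temp
--                 distanceList.append(distance)
--     distanceList.sort()
--     answer = distanceList[0]
--     return answer
-- ===== SOURCE B (Python) =====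
-- def solution(N, house):
--     """Minimum over the houses of the squared distance to the grid corner (-100, -100)."""
--     best = None
--     for h in house:
--         d = (h[0] + 100) ** 2 + (h[1] + 100) ** 2
--         if best is None or d < best:
--             best = d
--     return best
-- ===== Notes on version B (the rewrite author's own statement) =====
-- stated objective: faster
-- what changed: A scans all 40401 grid points per house, appends every running-max snapshot and sorts the whole list to take its first element; since each house's snapshots start at its distance to the first grid point (-100,-100) and only grow, that result is the minimum over houses of (hx+100)^2+(hy+100)^2, which B computes in one pass with a running minimum and no grid, no snapshot list and no sort. Pre_ excludes the inputs on which A raises: an empty house list (IndexError on distanceList[0]) and rows shorter than 2 (IndexError on house[h][1]).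
import Mathlib
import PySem

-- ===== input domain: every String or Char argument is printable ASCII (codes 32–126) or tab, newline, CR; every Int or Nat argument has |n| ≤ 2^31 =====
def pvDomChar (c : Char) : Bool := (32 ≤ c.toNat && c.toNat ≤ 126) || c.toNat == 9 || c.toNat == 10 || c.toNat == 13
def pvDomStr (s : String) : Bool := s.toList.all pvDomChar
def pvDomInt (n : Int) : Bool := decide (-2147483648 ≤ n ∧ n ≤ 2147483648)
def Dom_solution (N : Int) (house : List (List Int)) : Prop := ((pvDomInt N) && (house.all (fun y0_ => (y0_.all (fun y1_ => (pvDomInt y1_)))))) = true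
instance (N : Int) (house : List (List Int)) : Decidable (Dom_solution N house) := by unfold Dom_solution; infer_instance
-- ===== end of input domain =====

-- B replaces A's 40401-point grid scan, snapshot list and sort by one pass keeping a running
-- minimum of (hx+100)^2+(hy+100)^2 over the houses (objective: faster, constant factor).

-- ===== PORT A =====
-- the factory grid: [[i, j] for i in range(-100, 101) for j in range(-100, 101)]
def factoryA : List (List Int) :=
  (PySem.List.pyRange (-100) 101).foldl (fun acc i =>
    (PySem.List.pyRange (-100) 101).foldl (fun acc2 j => acc2 ++ [[i, j]]) acc) []

def solution (N : Int) (house : List (List Int)) : Int :=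
  -- the two 'for k in range(0, len(xs)): ... xs[k]' loops are folds over xs itself, in order
  let distanceList : List Int :=
    house.foldl (fun dl h =>
      (factoryA.foldl (fun (st : Int × List Int) f =>
        let temp := (PySem.List.pyGetD h 0 0 - PySem.List.pyGetD f 0 0) ^ 2
                  + (PySem.List.pyGetD h 1 0 - PySem.List.pyGetD f 1 0) ^ 2
        if st.1 ≤ temp then (temp, st.2 ++ [temp]) else st) (0, dl)).2) []
  -- distanceList.sort(); answer = distanceList[0]  (Pre_ excludes the empty case)
  PySem.List.pyGetD (PySem.List.sorted distanceList (fun x => x)) 0 0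

-- ===== PORT B =====
def solution_alt (N : Int) (house : List (List Int)) : Int :=
  -- running minimum: best = None; for h in house: d = ...; if best is None or d < best: best = d
  (house.foldl (fun (best : Option Int) h =>
      let d := (PySem.List.pyGetD h 0 0 + 100) ^ 2 + (PySem.List.pyGetD h 1 0 + 100) ^ 2
      match best with
      | none => some d
      | some b => if d < b then some d else some b) none).getD 0

-- ===== PRECONDITION & SPEC =====
-- Pre_ excludes exactly the inputs where Python A raises: an empty house list (IndexError on
-- distanceList[0]) and rows shorter than 2 (IndexError on house[h][1]).
def Pre_solution (N : Int) (house : List (List Int)) : Prop :=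
  house ≠ [] ∧ ∀ r ∈ house, 2 ≤ r.length
instance (N : Int) (house : List (List Int)) : Decidable (Pre_solution N house) := by
  unfold Pre_solution; infer_instance
def pvWitness_solution : Int × List (List Int) := (2, [[1, 2], [3, 4]])
def Spec_solution (N : Int) (house : List (List Int)) (out : Int) : Prop := out = solution_alt N house
instance (N : Int) (house : List (List Int)) (out : Int) : Decidable (Spec_solution N house out) := by unfold Spec_solution; infer_instance

-- ===== CLAIM (what is proved, stated in full; the proofs are below) =====
def Claim_equal_solution : Prop := ∀ (N : Int) (house : List (List Int)), Dom_solution N house → Pre_solution N house → Spec_solution N house (solution N house)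

-- ===== LEMMAS AND PROOFS =====

-- the step of A's inner factory loop, abstracted over the per-element distance g
def pvStep (g : List Int → Int) (st : Int × List Int) (f : List Int) : Int × List Int :=
  if st.1 ≤ g f then (g f, st.2 ++ [g f]) else st

-- the inner loop only appends: the accumulated list is a prefix
lemma pvStep_prefix (g : List Int → Int) (fs : List (List Int)) (d : Int) (dl : List Int) :
    fs.foldl (pvStep g) (d, dl)
      = ((fs.foldl (pvStep g) (d, [])).1, dl ++ (fs.foldl (pvStep g) (d, [])).2) := by
  induction fs generalizing d dl with
  | nil => simp
  | cons f t ih =>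
    have hstep : ∀ (st : Int × List Int) (f : List Int),
        pvStep g st f = if st.1 ≤ g f then (g f, st.2 ++ [g f]) else st := fun _ _ => rfl
    rw [List.foldl_cons, List.foldl_cons, hstep, hstep]
    simp only
    split_ifs
    · simp only [List.nil_append]
      rw [ih (g f) (dl ++ [g f]), ih (g f) [g f]]
      simp
    · exact ih d dl

-- every value appended by the inner loop is at least the starting distance
lemma pvStep_ge (g : List Int → Int) (fs : List (List Int)) (d : Int) :
    d ≤ (fs.foldl (pvStep g) (d, [])).1 ∧ ∀ x ∈ (fs.foldl (pvStep g) (d, [])).2, d ≤ x := by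
  induction fs generalizing d with
  | nil => simp
  | cons f t ih =>
    have hstep : ∀ (st : Int × List Int) (f : List Int),
        pvStep g st f = if st.1 ≤ g f then (g f, st.2 ++ [g f]) else st := fun _ _ => rfl
    rw [List.foldl_cons, hstep]
    simp only
    split_ifs with h
    · simp only [List.nil_append]
      rw [pvStep_prefix g t (g f) [g f]]
      refine ⟨le_trans h (ih (g f)).1, ?_⟩
      intro x hx
      simp only [List.mem_append, List.mem_singleton] at hx
      rcases hx with hx | hx
      · omega
      · exact le_trans h ((ih (g f)).2 x hx)
    · exact ih d

-- the appended list of a full inner pass starting at 0 is (g f0) :: rest with rest ≥ g f0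
lemma pvInner_shape (g : List Int → Int) (f0 : List Int) (t : List (List Int)) (h0 : 0 ≤ g f0) :
    ∃ δ, ((f0 :: t).foldl (pvStep g) ((0 : Int), ([] : List Int))).2 = g f0 :: δ
      ∧ ∀ x ∈ δ, g f0 ≤ x := by
  have hstep : pvStep g (0, []) f0 = ((g f0), [g f0]) := by
    simp [pvStep, h0]
  rw [List.foldl_cons, hstep]
  rw [pvStep_prefix g t (g f0) [g f0]]
  exact ⟨(t.foldl (pvStep g) (g f0, [])).2, by simp, (pvStep_ge g t (g f0)).2⟩

-- A's factory list in closed form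
lemma factoryA_eq :
    factoryA
    = (PySem.List.pyRange (-100) 101).flatMap
        (fun i => (PySem.List.pyRange (-100) 101).map (fun j => ([i, j] : List Int))) := by
  show ((PySem.List.pyRange (-100) 101).foldl (fun acc i =>
      (PySem.List.pyRange (-100) 101).foldl (fun acc2 j => acc2 ++ [[i, j]]) acc) []) = _
  have h : ∀ (i : Int) (acc : List (List Int)),
      (PySem.List.pyRange (-100) 101).foldl (fun acc2 j => acc2 ++ [[i, j]]) acc
        = acc ++ (PySem.List.pyRange (-100) 101).map (fun j => [i, j]) := fun i acc =>
    PySem.List.foldl_append_singleton_eq_map (fun j => [i, j]) _ acc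
  rw [PySem.List.foldl_congr_mem _ _
        (fun acc i => acc ++ (PySem.List.pyRange (-100) 101).map (fun j => [i, j])) _
        (fun acc i _ => h i acc),
      PySem.List.foldl_append_eq_flatMap]
  simp

-- the factory list starts with the corner [-100, -100]
lemma factoryA_cons : ∃ t, factoryA = ([-100, -100] : List Int) :: t := by
  rw [factoryA_eq, PySem.List.pyRange_one_cons (by norm_num)]
  simp only [List.flatMap_cons, List.map_cons]
  exact ⟨_, rfl⟩

-- corner distance of a row
def pvC (r : List Int) : Int :=
  (PySem.List.pyGetD r 0 0 + 100) ^ 2 + (PySem.List.pyGetD r 1 0 + 100) ^ 2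

lemma pvC_nonneg (r : List Int) : 0 ≤ pvC r := by
  unfold pvC; positivity

-- the per-factory distance and the per-house list of values A appends
def pvG (row fac : List Int) : Int :=
  (PySem.List.pyGetD row 0 0 - PySem.List.pyGetD fac 0 0) ^ 2
  + (PySem.List.pyGetD row 1 0 - PySem.List.pyGetD fac 1 0) ^ 2

def pvDeltaF (fs : List (List Int)) (row : List Int) : List Int :=
  (fs.foldl (pvStep (pvG row)) (0, [])).2

lemma pvG_corner (row : List Int) : pvG row [-100, -100] = pvC row := by
  simp only [pvG, pvC, PySem.List.pyGetD_zero_cons]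
  have h1 : PySem.List.pyGetD ([-100, -100] : List Int) 1 0 = -100 := by decide
  rw [h1]; ring

lemma pvDeltaF_shape (row f0 : List Int) (t : List (List Int)) (h0 : 0 ≤ pvG row f0) :
    ∃ δ, pvDeltaF (f0 :: t) row = pvG row f0 :: δ ∧ ∀ x ∈ δ, pvG row f0 ≤ x :=
  pvInner_shape (pvG row) f0 t h0

-- shape of A's per-house append list: head = corner distance, rest ≥ it
lemma pvDelta_shape (row : List Int) :
    ∃ δ, pvDeltaF factoryA row = pvC row :: δ ∧ ∀ x ∈ δ, pvC row ≤ x := by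
  obtain ⟨t, hfac⟩ := factoryA_cons
  obtain ⟨δ, hδ, hge⟩ := pvDeltaF_shape row [-100, -100] t (by rw [pvG_corner]; exact pvC_nonneg row)
  rw [pvG_corner] at hδ hge
  rw [← hfac] at hδ
  exact ⟨δ, hδ, hge⟩

-- the inner factory loop, as prefix ++ per-house appends (abstract factory list)
lemma pvInner_conv (fs : List (List Int)) (dl row : List Int) :
    (fs.foldl (pvStep (pvG row)) (0, dl)).2 = dl ++ pvDeltaF fs row := by
  rw [pvStep_prefix (pvG row) fs 0 dl]
  rfl

-- A's distanceList in closed form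
lemma solution_eq (N : Int) (house : List (List Int)) :
    solution N house
      = PySem.List.pyGetD (PySem.List.sorted (house.flatMap (pvDeltaF factoryA)) (fun x => x)) 0 0 := by
  have hL1 : solution N house
      = PySem.List.pyGetD (PySem.List.sorted
          (house.foldl (fun dl row =>
            (factoryA.foldl (pvStep (pvG row)) (0, dl)).2) []) (fun x => x)) 0 0 := rfl
  rw [hL1,
      PySem.List.foldl_congr_mem house _ (fun dl row => dl ++ pvDeltaF factoryA row) []
        (fun dl row _ => pvInner_conv factoryA dl row),
      PySem.List.foldl_append_eq_flatMap]
  simp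

-- B's running-minimum step, written over pvC (definitionally the port's step function)
def pvMin (best : Option Int) (h : List Int) : Option Int :=
  match best with
  | none => some (pvC h)
  | some b => if pvC h < b then some (pvC h) else some b

-- invariant of B's fold once the accumulator is some b
lemma pvMin_fold (t : List (List Int)) (b : Int) :
    ∃ v, t.foldl pvMin (some b) = some v ∧ v ≤ b ∧ (v = b ∨ v ∈ t.map pvC)
      ∧ ∀ y ∈ t.map pvC, v ≤ y := by
  induction t generalizing b with
  | nil => exact ⟨b, by simp⟩
  | cons h t ih =>
    rw [List.foldl_cons]
    have hred : pvMin (some b) h = if pvC h < b then some (pvC h) else some b := rfl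
    rw [hred]
    split_ifs with hlt
    · obtain ⟨v, hv, hle, hmem, hall⟩ := ih (pvC h)
      refine ⟨v, hv, by omega, ?_, ?_⟩
      · rcases hmem with rfl | hm
        · exact Or.inr (by simp)
        · exact Or.inr (List.mem_cons_of_mem _ hm)
      · intro y hy
        rcases List.mem_cons.1 hy with rfl | hy'
        · exact hle
        · exact hall y hy'
    · obtain ⟨v, hv, hle, hmem, hall⟩ := ih b
      refine ⟨v, hv, hle, ?_, ?_⟩
      · rcases hmem with rfl | hm
        · exact Or.inl rfl
        · exact Or.inr (List.mem_cons_of_mem _ hm)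
      · intro y hy
        rcases List.mem_cons.1 hy with rfl | hy'
        · omega
        · exact hall y hy'

-- B on a nonempty house list: some v with v a corner distance and v minimal among them
lemma solution_alt_min (N : Int) (r : List Int) (t : List (List Int)) :
    ∃ v, solution_alt N (r :: t) = v ∧ v ∈ (r :: t).map pvC
      ∧ ∀ y ∈ (r :: t).map pvC, v ≤ y := by
  have hport : solution_alt N (r :: t) = (t.foldl pvMin (some (pvC r))).getD 0 := rfl
  obtain ⟨v, hv, hle, hmem, hall⟩ := pvMin_fold t (pvC r)
  refine ⟨v, by rw [hport, hv]; rfl, ?_, ?_⟩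
  · rcases hmem with rfl | hm
    · exact List.mem_map_of_mem List.mem_cons_self
    · simp only [List.map_cons]
      exact List.mem_cons_of_mem _ hm
  · intro y hy
    simp only [List.map_cons] at hy
    rcases List.mem_cons.1 hy with rfl | hy'
    · exact hle
    · exact hall y hy'

-- ===== VERDICT (by name: the statement is the Claim_ definition above) =====
theorem solution_spec : Claim_equal_solution := by
  intro N house _ hpre
  obtain ⟨hne, -⟩ := hpre
  unfold Spec_solution
  obtain ⟨r, t, rfl⟩ := List.exists_cons_of_ne_nil hne
  obtain ⟨v, hvdef, hv_mem, hv_le⟩ := solution_alt_min N r t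
  rw [solution_eq, hvdef]
  -- the sorted list is nonempty
  have hfm : (r :: t).flatMap (pvDeltaF factoryA) ≠ [] := by
    obtain ⟨δ, hδ, -⟩ := pvDelta_shape r
    simp [hδ]
  obtain ⟨m, τ, hmt⟩ : ∃ m τ, PySem.List.sorted ((r :: t).flatMap (pvDeltaF factoryA)) (fun x => x) = m :: τ := by
    cases hs : PySem.List.sorted ((r :: t).flatMap (pvDeltaF factoryA)) (fun x => x) with
    | nil => exact absurd ((PySem.List.sorted_eq_nil_iff _ _ _).1 hs) hfm
    | cons m τ => exact ⟨m, τ, rfl⟩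
  rw [hmt, PySem.List.pyGetD_zero_cons]
  -- m is the head of the sorted list: a member, and ≤ every member
  have hm_mem : m ∈ (r :: t).flatMap (pvDeltaF factoryA) :=
    (PySem.List.sorted_perm ((r :: t).flatMap (pvDeltaF factoryA)) (fun x => x) false).mem_iff.1
      (hmt ▸ List.mem_cons_self)
  have hm_le : ∀ y ∈ (r :: t).flatMap (pvDeltaF factoryA), m ≤ y :=
    PySem.List.key_head_sorted_le ((r :: t).flatMap (pvDeltaF factoryA)) (fun x => x) hmt
  -- v ≤ m
  obtain ⟨row, hrow, hmrow⟩ := List.mem_flatMap.1 hm_mem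
  obtain ⟨δ, hδ, hge⟩ := pvDelta_shape row
  have h1 : v ≤ m := by
    have hvc : v ≤ pvC row := hv_le _ (List.mem_map_of_mem hrow)
    rw [hδ] at hmrow
    rcases List.mem_cons.1 hmrow with h | h
    · omega
    · exact le_trans hvc (hge m h)
  -- m ≤ v
  obtain ⟨row', hrow', hvrow'⟩ := List.mem_map.1 hv_mem
  obtain ⟨δ', hδ', -⟩ := pvDelta_shape row'
  have h2 : m ≤ v := by
    have : pvC row' ∈ (r :: t).flatMap (pvDeltaF factoryA) :=
      List.mem_flatMap.2 ⟨row', hrow', by rw [hδ']; exact List.mem_cons_self⟩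
    exact hvrow' ▸ hm_le _ this
  omega
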